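-- pv_equiv track=rewrite | github.com/joe-busch/abstract-recursion-theory | euc.py | find_least_m
-- ===== SOURCE A (Python) =====
-- max_input = 15000
--
-- def find_least_m(a, b, gcd):
--     """Returns the least m such that gcd(a, b) belongs to the mth generated
-- subalgebra.
--
--     """
--
--     G = []
--     G.append({0, 1, a, b})
--
--     for m in range(max_input):
--         if gcd in G[m]:
--             return m
--         else:
--             G.append(G[m] | {x % y for x in G[m] for y in G[m] if y != 0})
-- ===== SOURCE B (Python) =====
-- max_input = 15000
--
-- def find_least_m(a, b, gcd):
--     """Returns the least m such that gcd(a, b) belongs to the mth generated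
-- subalgebra."""
--     seen = {0, 1, a, b}
--     frontier = set(seen)
--     for m in range(max_input):
--         if gcd in seen:
--             return m
--         new = set()
--         for x in seen:
--             for y in frontier:
--                 if y != 0:
--                     new.add(x % y)
--         for x in frontier:
--             for y in seen:
--                 if y != 0:
--                     new.add(x % y)
--         new -= seen
--         if not new:
--             return None
--         seen |= new
--         frontier = new
-- ===== Notes on version B (the rewrite author's own statement) =====
-- stated objective: faster
-- what changed: B replaces A's per-level recomputation of all x%y over the whole current set (and A's fixed 15000 iterations even after the closure stops growing) by an incremental frontier expansion that only combines pairs touching the newly-added elements and stops at the fixpoint.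
import Mathlib
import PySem

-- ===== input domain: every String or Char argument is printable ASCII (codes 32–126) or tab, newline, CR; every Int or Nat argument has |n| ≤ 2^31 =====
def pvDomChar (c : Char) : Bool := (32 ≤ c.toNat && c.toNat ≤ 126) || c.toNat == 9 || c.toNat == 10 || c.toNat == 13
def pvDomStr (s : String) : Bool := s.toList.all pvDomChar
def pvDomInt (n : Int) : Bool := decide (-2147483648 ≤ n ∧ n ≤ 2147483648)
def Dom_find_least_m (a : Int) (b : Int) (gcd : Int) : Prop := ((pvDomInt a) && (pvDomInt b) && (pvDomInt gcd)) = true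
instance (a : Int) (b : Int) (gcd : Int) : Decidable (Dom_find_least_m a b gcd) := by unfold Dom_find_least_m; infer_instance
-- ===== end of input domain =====

-- B replaces A's recomputation of the full mod-set of G[m] at every level by an
-- incremental frontier expansion (each pair is combined only when one side is new,
-- and a reached fixpoint stops the loop early); same return value, proved below.

-- ===== PORT A =====
-- {x % y for x in G for y in G if y != 0}
def pvModsA (G : PySem.Set Int) : PySem.Set Int :=
  PySem.Set.ofList (G.flatMap fun x => (G.filter fun y => y != 0).map fun y => PySem.Int.mod x y)

-- the 'for m in range(max_input)' loop; A's list G is only ever read at its last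
-- index m (G[m]), so the port carries that current set as the loop state
def pvLoopA (gcd : Int) : List Int → PySem.Set Int → Option Int
  | [], _ => none
  | m :: ms, G =>
    if PySem.Set.contains G gcd then some m
    else pvLoopA gcd ms (PySem.Set.union G (pvModsA G))

def find_least_m (a : Int) (b : Int) (gcd : Int) : Option Int :=
  pvLoopA gcd (PySem.List.pyRange 0 15000 1) (PySem.Set.ofList [0, 1, a, b])

-- ===== PORT B =====
-- the two nested 'for x in xs: for y in ys: if y != 0: new.add(x % y)' loops
def pvModsInto (acc : PySem.Set Int) (xs ys : List Int) : PySem.Set Int :=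
  xs.foldl (fun acc x =>
    ys.foldl (fun acc y => if y != 0 then PySem.Set.add acc (PySem.Int.mod x y) else acc) acc) acc

def pvLoopB (gcd : Int) : List Int → PySem.Set Int → PySem.Set Int → Option Int
  | [], _, _ => none
  | m :: ms, seen, frontier =>
    if PySem.Set.contains seen gcd then some m
    else
      let nw := PySem.Set.diff (pvModsInto (pvModsInto PySem.Set.empty seen frontier) frontier seen) seen
      if nw.isEmpty then none
      else pvLoopB gcd ms (PySem.Set.union seen nw) nw

def find_least_m_alt (a : Int) (b : Int) (gcd : Int) : Option Int :=
  let seen := PySem.Set.ofList [0, 1, a, b]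
  pvLoopB gcd (PySem.List.pyRange 0 15000 1) seen seen

-- ===== PRECONDITION & SPEC =====
def Spec_find_least_m (a : Int) (b : Int) (gcd : Int) (out : Option Int) : Prop := out = find_least_m_alt a b gcd
instance (a : Int) (b : Int) (gcd : Int) (out : Option Int) : Decidable (Spec_find_least_m a b gcd out) := by unfold Spec_find_least_m; infer_instance

-- ===== CLAIM (what is proved, stated in full; the proofs are below) =====
def Claim_equal_find_least_m : Prop := ∀ (a : Int) (b : Int) (gcd : Int), Dom_find_least_m a b gcd → Spec_find_least_m a b gcd (find_least_m a b gcd)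

-- ===== LEMMAS AND PROOFS =====

theorem mem_pvModsA {G : PySem.Set Int} {z : Int} :
    z ∈ pvModsA G ↔ ∃ x ∈ G, ∃ y ∈ G, y ≠ 0 ∧ z = PySem.Int.mod x y := by
  simp only [pvModsA, PySem.Set.mem_ofList, List.mem_flatMap, List.mem_map, List.mem_filter,
    bne_iff_ne]
  constructor
  · rintro ⟨x, hx, y, ⟨hy, hy0⟩, rfl⟩; exact ⟨x, hx, y, hy, hy0, rfl⟩
  · rintro ⟨x, hx, y, hy, hy0, rfl⟩; exact ⟨x, hx, y, ⟨hy, hy0⟩, rfl⟩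

theorem mem_pvModsInto_inner {acc : PySem.Set Int} {x z : Int} {ys : List Int} :
    z ∈ ys.foldl (fun acc y => if y != 0 then PySem.Set.add acc (PySem.Int.mod x y) else acc) acc ↔
      z ∈ acc ∨ ∃ y ∈ ys, y ≠ 0 ∧ z = PySem.Int.mod x y := by
  induction ys generalizing acc with
  | nil => simp
  | cons y ys ih =>
    simp only [List.foldl_cons, ih]
    by_cases hy : y = 0
    · simp [hy]
    · simp [hy, PySem.Set.mem_add]
      tauto

theorem mem_pvModsInto {acc : PySem.Set Int} {z : Int} {xs ys : List Int} :
    z ∈ pvModsInto acc xs ys ↔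
      z ∈ acc ∨ ∃ x ∈ xs, ∃ y ∈ ys, y ≠ 0 ∧ z = PySem.Int.mod x y := by
  induction xs generalizing acc with
  | nil => simp [pvModsInto]
  | cons x xs ih =>
    simp only [pvModsInto, List.foldl_cons] at *
    rw [ih, mem_pvModsInto_inner]
    simp only [List.mem_cons]
    constructor
    · rintro ((h | ⟨y, hy, hy0, rfl⟩) | ⟨x', hx', y, hy, hy0, rfl⟩)
      · exact Or.inl h
      · exact Or.inr ⟨x, Or.inl rfl, y, hy, hy0, rfl⟩
      · exact Or.inr ⟨x', Or.inr hx', y, hy, hy0, rfl⟩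
    · rintro (h | ⟨x', hx' | hx', y, hy, hy0, rfl⟩)
      · exact Or.inl (Or.inl h)
      · subst hx'; exact Or.inl (Or.inr ⟨y, hy, hy0, rfl⟩)
      · exact Or.inr ⟨x', hx', y, hy, hy0, rfl⟩

-- membership in the double-loop set built by B in one level
theorem mem_pvT {seen frontier : PySem.Set Int} {z : Int} :
    z ∈ pvModsInto (pvModsInto PySem.Set.empty seen frontier) frontier seen ↔
      (∃ x ∈ seen, ∃ y ∈ frontier, y ≠ 0 ∧ z = PySem.Int.mod x y) ∨
      (∃ x ∈ frontier, ∃ y ∈ seen, y ≠ 0 ∧ z = PySem.Int.mod x y) := by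
  rw [mem_pvModsInto, mem_pvModsInto]
  simp [PySem.Set.empty]

-- A's loop on a mod-closed set not containing gcd returns none for any fuel
theorem pvLoopA_closed_none {gcd : Int} (ms : List Int) :
    ∀ G : PySem.Set Int,
    (∀ x ∈ G, ∀ y ∈ G, y ≠ 0 → PySem.Int.mod x y ∈ G) →
    gcd ∉ G → pvLoopA gcd ms G = none := by
  induction ms with
  | nil => intro G _ _; rfl
  | cons m ms ih =>
    intro G hcl hg
    have hc : PySem.Set.contains G gcd = false := by
      rw [← Bool.not_eq_true, PySem.Set.contains_iff]; exact hg
    simp only [pvLoopA, hc, Bool.false_eq_true, if_false]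
    have hsub : ∀ z, z ∈ PySem.Set.union G (pvModsA G) ↔ z ∈ G := by
      intro z
      rw [PySem.Set.mem_union, mem_pvModsA]
      constructor
      · rintro (h | ⟨x, hx, y, hy, hy0, rfl⟩)
        · exact h
        · exact hcl x hx y hy hy0
      · exact Or.inl
    exact ih _ (fun x hx y hy hy0 => (hsub _).mpr (hcl x ((hsub x).mp hx) y ((hsub y).mp hy) hy0))
      (fun h => hg ((hsub gcd).mp h))

-- main simulation lemma
theorem pvLoopA_eq_pvLoopB {gcd : Int} (ms : List Int) (G seen frontier : PySem.Set Int)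
    (hmem : ∀ z, z ∈ G ↔ z ∈ seen)
    (hfr : ∀ z ∈ frontier, z ∈ seen)
    (hinv : ∀ x ∈ seen, ∀ y ∈ seen, y ≠ 0 → x ∉ frontier → y ∉ frontier →
      PySem.Int.mod x y ∈ seen) :
    pvLoopA gcd ms G = pvLoopB gcd ms seen frontier := by
  induction ms generalizing G seen frontier with
  | nil => rfl
  | cons m ms ih =>
    have hc : PySem.Set.contains G gcd = PySem.Set.contains seen gcd := by
      by_cases h : gcd ∈ seen
      · rw [(PySem.Set.contains_iff _ _).mpr ((hmem gcd).mpr h), (PySem.Set.contains_iff _ _).mpr h]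
      · have h1 : PySem.Set.contains G gcd = false := by
          rw [← Bool.not_eq_true, PySem.Set.contains_iff]
          exact fun hh => h ((hmem gcd).mp hh)
        have h2 : PySem.Set.contains seen gcd = false := by
          rw [← Bool.not_eq_true, PySem.Set.contains_iff]; exact h
        rw [h1, h2]
    by_cases hgd : gcd ∈ seen
    · simp only [pvLoopA, pvLoopB, hc, (PySem.Set.contains_iff _ _).mpr hgd, if_true]
    · have h2 : PySem.Set.contains seen gcd = false := by
        rw [← Bool.not_eq_true, PySem.Set.contains_iff]; exact hgd
      simp only [pvLoopA, pvLoopB, hc, h2, Bool.false_eq_true, if_false]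
      set T := pvModsInto (pvModsInto PySem.Set.empty seen frontier) frontier seen with hT
      set nw := PySem.Set.diff T seen with hnw
      have hmemnw : ∀ z, z ∈ nw ↔ z ∈ T ∧ z ∉ seen := fun z => PySem.Set.mem_diff _ _ _
      by_cases hE : nw.isEmpty
      · -- fixpoint: A's loop never finds gcd either
        simp only [hE, if_true]
        have hnil : nw = [] := List.isEmpty_iff.mp hE
        -- seen (hence G) is mod-closed
        have hclosed : ∀ x ∈ seen, ∀ y ∈ seen, y ≠ 0 → PySem.Int.mod x y ∈ seen := by
          intro x hx y hy hy0
          by_cases hfx : x ∈ frontier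
          · by_contra hmod
            have : PySem.Int.mod x y ∈ nw :=
              (hmemnw _).mpr ⟨mem_pvT.mpr (Or.inr ⟨x, hfx, y, hy, hy0, rfl⟩), hmod⟩
            rw [hnil] at this; exact (List.not_mem_nil).elim this
          · by_cases hfy : y ∈ frontier
            · by_contra hmod
              have : PySem.Int.mod x y ∈ nw :=
                (hmemnw _).mpr ⟨mem_pvT.mpr (Or.inl ⟨x, hx, y, hfy, hy0, rfl⟩), hmod⟩
              rw [hnil] at this; exact (List.not_mem_nil).elim this
            · exact hinv x hx y hy hy0 hfx hfy
        have hclG : ∀ x ∈ G, ∀ y ∈ G, y ≠ 0 → PySem.Int.mod x y ∈ G := by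
          intro x hx y hy hy0
          exact (hmem _).mpr (hclosed x ((hmem x).mp hx) y ((hmem y).mp hy) hy0)
        have hsub : ∀ z, z ∈ PySem.Set.union G (pvModsA G) ↔ z ∈ G := by
          intro z
          rw [PySem.Set.mem_union, mem_pvModsA]
          constructor
          · rintro (h | ⟨x, hx, y, hy, hy0, rfl⟩)
            · exact h
            · exact hclG x hx y hy hy0
          · exact Or.inl
        exact pvLoopA_closed_none ms _
          (fun x hx y hy hy0 => (hsub _).mpr (hclG x ((hsub x).mp hx) y ((hsub y).mp hy) hy0))
          (fun h => hgd ((hmem gcd).mp ((hsub gcd).mp h)))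
      · simp only [hE]
        apply ih
        · -- membership equality of the two next states
          intro z
          rw [PySem.Set.mem_union, PySem.Set.mem_union, mem_pvModsA, hmemnw z, mem_pvT]
          constructor
          · rintro (h | ⟨x, hx, y, hy, hy0, rfl⟩)
            · exact Or.inl ((hmem z).mp h)
            · have hx' := (hmem x).mp hx
              have hy' := (hmem y).mp hy
              by_cases hs : PySem.Int.mod x y ∈ seen
              · exact Or.inl hs
              · by_cases hfx : x ∈ frontier
                · exact Or.inr ⟨Or.inr ⟨x, hfx, y, hy', hy0, rfl⟩, hs⟩
                · by_cases hfy : y ∈ frontier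
                  · exact Or.inr ⟨Or.inl ⟨x, hx', y, hfy, hy0, rfl⟩, hs⟩
                  · exact Or.inl (hinv x hx' y hy' hy0 hfx hfy)
          · rintro (h | ⟨(⟨x, hx, y, hy, hy0, rfl⟩ | ⟨x, hx, y, hy, hy0, rfl⟩), -⟩)
            · exact Or.inl ((hmem z).mpr h)
            · exact Or.inr ⟨x, (hmem x).mpr hx, y, (hmem y).mpr (hfr y hy), hy0, rfl⟩
            · exact Or.inr ⟨x, (hmem x).mpr (hfr x hx), y, (hmem y).mpr hy, hy0, rfl⟩
        · -- new frontier lies inside the new seen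
          intro z hz
          exact (PySem.Set.mem_union _ _ _).mpr (Or.inr hz)
        · -- closure invariant for the next state
          intro x hx y hy hy0 hfx hfy
          have hx' : x ∈ seen := by
            rcases (PySem.Set.mem_union _ _ _).mp hx with h | h
            · exact h
            · exact absurd h hfx
          have hy' : y ∈ seen := by
            rcases (PySem.Set.mem_union _ _ _).mp hy with h | h
            · exact h
            · exact absurd h hfy
          by_cases hs : PySem.Int.mod x y ∈ seen
          · exact (PySem.Set.mem_union _ _ _).mpr (Or.inl hs)
          · by_cases hf1 : x ∈ frontier
            · exact (PySem.Set.mem_union _ _ _).mpr (Or.inr ((hmemnw _).mpr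
                ⟨mem_pvT.mpr (Or.inr ⟨x, hf1, y, hy', hy0, rfl⟩), hs⟩))
            · by_cases hf2 : y ∈ frontier
              · exact (PySem.Set.mem_union _ _ _).mpr (Or.inr ((hmemnw _).mpr
                  ⟨mem_pvT.mpr (Or.inl ⟨x, hx', y, hf2, hy0, rfl⟩), hs⟩))
              · exact (PySem.Set.mem_union _ _ _).mpr (Or.inl (hinv x hx' y hy' hy0 hf1 hf2))

-- ===== VERDICT (by name: the statement is the Claim_ definition above) =====
theorem find_least_m_spec : Claim_equal_find_least_m := by
  intro a b gcd _
  unfold Spec_find_least_m find_least_m find_least_m_alt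
  exact pvLoopA_eq_pvLoopB _ _ _ _ (fun z => Iff.rfl) (fun z h => h)
    (fun x hx y hy _ hxf _ => absurd hx hxf)
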